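-- pv_equiv track=rewrite | github.com/hemelb-codes/hemelb | py/hemeTools/hemeTools/utils/IterPairs.py | IterPairs
-- ===== SOURCE A (Python) =====
-- def IterPairs(iterable):
--     """Return adjacent pairs of items from iterable. I.e.:
--     IterPairs(lst) -> (lst[0], lst[1]), (lst[1], lst[2]), (lst[2], lst[3]), ..., (lst[i], lst[i+1])
--     """
--     first = True
--     for item in iterable:
--         if first:
--             new = item
--             first = False
--             continue
--         else:
--             old = new
--             new = item
--             yield old, new
--         continue
--     return
-- ===== SOURCE B (Python) =====
-- def IterPairs(iterable):
--     """Return adjacent pairs of items from iterable.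
--
--     Materialises the input once, then zips the list with its slice
--     shifted by one.  (Unlike the original, this consumes the whole
--     iterable on the first next(); the yielded pairs are identical.)
--     """
--     lst = list(iterable)
--     yield from zip(lst, lst[1:])
-- ===== Notes on version B (the rewrite author's own statement) =====
-- stated objective: idiomatic
-- what changed: Replaces the stateful first-flag/previous-element loop with a staged formulation: materialise the iterable into a list once, then zip the list with its one-shifted slice lst[1:]; no per-item branching or carried state.
import Mathlib
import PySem

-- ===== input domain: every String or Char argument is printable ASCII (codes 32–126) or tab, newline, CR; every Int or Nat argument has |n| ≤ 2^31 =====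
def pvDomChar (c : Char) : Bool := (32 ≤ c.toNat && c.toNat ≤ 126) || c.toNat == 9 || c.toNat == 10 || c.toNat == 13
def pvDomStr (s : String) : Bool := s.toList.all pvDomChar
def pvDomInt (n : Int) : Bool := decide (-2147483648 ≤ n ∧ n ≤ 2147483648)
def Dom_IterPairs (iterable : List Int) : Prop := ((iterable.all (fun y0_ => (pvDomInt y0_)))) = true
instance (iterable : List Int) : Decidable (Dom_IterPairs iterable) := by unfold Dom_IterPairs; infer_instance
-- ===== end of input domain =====

-- B replaces A's stateful first-flag loop with a staged formulation: materialise the list, then zip it with its slice lst[1:]; B consumes the iterable eagerly but yields the same pairs.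
-- ===== PORT A =====
-- loop state: `some n` means first = False with new = n; `none` means first = True
def IterPairsGo : List Int → Option Int → List (Int × Int)
  | [], _ => []
  | item :: rest, none => IterPairsGo rest (some item)
  | item :: rest, some new => (new, item) :: IterPairsGo rest (some item)

def IterPairs (iterable : List Int) : List (Int × Int) :=
  IterPairsGo iterable none

-- ===== PORT B =====
-- lst = list(iterable); zip(lst, lst[1:])
def IterPairs_alt (iterable : List Int) : List (Int × Int) :=
  iterable.zip (PySem.List.slice iterable (some 1) none)

-- ===== PRECONDITION & SPEC =====
def Spec_IterPairs (iterable : List Int) (out : List (Int × Int)) : Prop := out = IterPairs_alt iterable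
instance (iterable : List Int) (out : List (Int × Int)) : Decidable (Spec_IterPairs iterable out) := by unfold Spec_IterPairs; infer_instance

-- ===== CLAIM (what is proved, stated in full; the proofs are below) =====
def Claim_equal_IterPairs : Prop := ∀ (iterable : List Int), Dom_IterPairs iterable → Spec_IterPairs iterable (IterPairs iterable)

-- ===== LEMMAS AND PROOFS =====
lemma IterPairsGo_some (xs : List Int) (p : Int) :
    IterPairsGo xs (some p) = (p :: xs).zip xs := by
  induction xs generalizing p with
  | nil => simp [IterPairsGo]
  | cons x t ih => simp [IterPairsGo, List.zip, ih]

-- ===== VERDICT (by name: the statement is the Claim_ definition above) =====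
theorem IterPairs_spec : Claim_equal_IterPairs := by
  intro iterable _
  unfold Spec_IterPairs IterPairs IterPairs_alt
  rw [PySem.List.slice_from_one]
  cases iterable with
  | nil => rfl
  | cons x t => simp [IterPairsGo, IterPairsGo_some]
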